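-- pv_equiv track=rewrite | github.com/zhoudan123456/interface_pytest | processors/document_processor.py | extract_text_sections
-- ===== SOURCE A (Python) =====
-- from typing import Dict, List, Optional
--
-- def extract_text_sections(text: str, sections: List[str]) -> Dict[str, str]:
--     """
--     提取文档的特定章节
--     :param text: 文档文本
--     :param sections: 要提取的章节标题列表
--     :return: 章节内容字典
--     """
--     sections_dict = {}
--     lines = text.split('\n')
--     current_section = None
--     current_content = []
--
--     for line in lines:
--         # 检查是否是章节标题
--         if any(section in line for section in sections):
--             # 保存上一个章节
--             if current_section:
--                 sections_dict[current_section] = '\n'.join(current_content).strip()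
--
--             # 开始新章节
--             current_section = line.strip()
--             current_content = []
--         else:
--             if current_section:
--                 current_content.append(line)
--
--     # 保存最后一个章节
--     if current_section:
--         sections_dict[current_section] = '\n'.join(current_content).strip()
--
--     return sections_dict
-- ===== SOURCE B (Python) =====
-- def extract_text_sections(text, sections):
--     lines = text.split('\n')
--     headers = [(i, line.strip()) for i, line in enumerate(lines)
--                if any(section in line for section in sections)]
--     bounds = [i for i, _ in headers[1:]] + [len(lines)]
--     result = {}
--     for (i, title), j in zip(headers, bounds):
--         if title:
--             result[title] = '\n'.join(lines[i + 1:j]).strip()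
--     return result
-- ===== Notes on version B (the rewrite author's own statement) =====
-- stated objective: alternative
-- what changed: Replaces A's running current_section/current_content accumulator with a two-phase decomposition: first build a table of header line indices (with their stripped titles), then pair each header with the next header's index (or the line count) and extract each section's content by slicing the line list between the boundaries.
import Mathlib
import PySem

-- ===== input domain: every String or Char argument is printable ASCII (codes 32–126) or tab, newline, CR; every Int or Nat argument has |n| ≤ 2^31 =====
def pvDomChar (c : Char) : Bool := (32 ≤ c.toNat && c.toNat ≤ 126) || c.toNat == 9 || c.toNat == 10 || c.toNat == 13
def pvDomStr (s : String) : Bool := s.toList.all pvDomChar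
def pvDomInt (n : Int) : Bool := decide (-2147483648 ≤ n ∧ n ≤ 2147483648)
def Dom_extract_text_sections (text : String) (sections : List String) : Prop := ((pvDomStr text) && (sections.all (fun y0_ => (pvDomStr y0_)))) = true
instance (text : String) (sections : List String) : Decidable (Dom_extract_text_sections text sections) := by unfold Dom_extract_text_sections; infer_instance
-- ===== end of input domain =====

-- B replaces A's running current_section/current_content accumulator with a header-index
-- table plus slice extraction (objective: alternative decomposition, same cost).

-- ===== PORT A =====
-- shared header test: any(section in line for section in sections)
def pvIsHdr (sections : List String) (line : String) : Bool :=
  sections.any (fun s => PySem.Str.isIn s line)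

-- Python truthiness of current_section (None or '' are falsy)
def pvTruthy : Option String → Bool
  | none => false
  | some s => !(s == "")

-- 'if current_section: sections_dict[current_section] = "\n".join(current_content).strip()'
def pvSaveA (d : PySem.Dict String String) (cs : Option String) (cc : List String) :
    PySem.Dict String String :=
  if pvTruthy cs then d.insert (cs.getD "") (PySem.Str.strip (PySem.Str.join "\n" cc)) else d

-- the body of A's for-loop, on state (sections_dict, current_section, current_content)
def pvStepA (sections : List String)
    (st : PySem.Dict String String × Option String × List String) (line : String) :
    PySem.Dict String String × Option String × List String :=
  if pvIsHdr sections line then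
    (pvSaveA st.1 st.2.1 st.2.2, some (PySem.Str.strip line), [])
  else
    if pvTruthy st.2.1 then (st.1, st.2.1, st.2.2 ++ [line]) else st

def extract_text_sections (text : String) (sections : List String) : List (String × String) :=
  let lines := (PySem.Str.split? text "\n").getD []
  let st := lines.foldl (pvStepA sections) (PySem.Dict.empty, none, [])
  (pvSaveA st.1 st.2.1 st.2.2).items

-- ===== PORT B =====
def extract_text_sections_alt (text : String) (sections : List String) : List (String × String) :=
  let lines := (PySem.Str.split? text "\n").getD []
  let headers := (PySem.List.enumerate lines).filterMap
      (fun p => if pvIsHdr sections p.2 then some (p.1, PySem.Str.strip p.2) else none)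
  let bounds := (headers.drop 1).map (·.1) ++ [(lines.length : Int)]
  let d := (headers.zip bounds).foldl
      (fun (d : PySem.Dict String String) p =>
        if p.1.2 ≠ "" then
          d.insert p.1.2
            (PySem.Str.strip (PySem.Str.join "\n"
              (PySem.List.slice lines (some (p.1.1 + 1)) (some p.2))))
        else d)
      PySem.Dict.empty
  d.items

-- ===== PRECONDITION & SPEC =====
def Spec_extract_text_sections (text : String) (sections : List String) (out : List (String × String)) : Prop := out = extract_text_sections_alt text sections
instance (text : String) (sections : List String) (out : List (String × String)) : Decidable (Spec_extract_text_sections text sections out) := by unfold Spec_extract_text_sections; infer_instance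

-- ===== CLAIM (what is proved, stated in full; the proofs are below) =====
def Claim_equal_extract_text_sections : Prop := ∀ (text : String) (sections : List String), Dom_extract_text_sections text sections → Spec_extract_text_sections text sections (extract_text_sections text sections)

-- ===== LEMMAS AND PROOFS =====

-- common intermediate: the (title, content) pair of every header line, in order
def pvSegs (sections : List String) : List String → List (String × String)
  | [] => []
  | l :: ls =>
      if pvIsHdr sections l then
        (PySem.Str.strip l,
          PySem.Str.strip (PySem.Str.join "\n" (ls.takeWhile (fun x => !pvIsHdr sections x))))
          :: pvSegs sections ls
      else pvSegs sections ls

-- folding pairs into the dict, skipping empty titles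
def pvDFold (d : PySem.Dict String String) (ps : List (String × String)) :
    PySem.Dict String String :=
  ps.foldl (fun d p => if p.1 ≠ "" then d.insert p.1 p.2 else d) d

theorem pvA_fold (sections : List String) (ls : List String) :
    ∀ (d : PySem.Dict String String) (cs : Option String) (cc : List String),
    (let st := ls.foldl (pvStepA sections) (d, cs, cc); pvSaveA st.1 st.2.1 st.2.2) =
      if pvTruthy cs then
        pvDFold d ((cs.getD "",
            PySem.Str.strip (PySem.Str.join "\n"
              (cc ++ ls.takeWhile (fun x => !pvIsHdr sections x)))) :: pvSegs sections ls)
      else pvDFold d (pvSegs sections ls) := by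
  induction ls with
  | nil =>
      intro d cs cc
      by_cases h : pvTruthy cs = true
      · simp [h, pvSaveA, pvDFold, pvSegs]
        cases cs with
        | none => simp [pvTruthy] at h
        | some s =>
            simp [pvTruthy] at h
            simp [h]
      · simp [pvSaveA, pvDFold, pvSegs, h]
  | cons l ls ih =>
      intro d cs cc
      by_cases hh : pvIsHdr sections l = true
      · -- header line
        simp only [List.foldl_cons, pvStepA, hh, if_pos]
        rw [ih (pvSaveA d cs cc) (some (PySem.Str.strip l)) []]
        have hsegs : pvSegs sections (l :: ls) =
            (PySem.Str.strip l,
              PySem.Str.strip (PySem.Str.join "\n"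
                (ls.takeWhile (fun x => !pvIsHdr sections x)))) :: pvSegs sections ls := by
          simp [pvSegs, hh]
        by_cases ht : pvTruthy cs = true
        · have hs : cs.getD "" ≠ "" := by
            cases cs with
            | none => simp [pvTruthy] at ht
            | some s => simp [pvTruthy] at ht; simpa using ht
          rw [if_pos ht, hsegs]
          have : (l :: ls).takeWhile (fun x => !pvIsHdr sections x) = [] := by
            simp [List.takeWhile, hh]
          rw [this, List.append_nil]
          by_cases hl : pvTruthy (some (PySem.Str.strip l)) = true
          · have hl' : PySem.Str.strip l ≠ "" := by
              simp [pvTruthy] at hl; simpa using hl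
            rw [if_pos hl]
            simp [pvDFold, hs, hl', pvSaveA, ht]
          · have hl' : PySem.Str.strip l = "" := by
              simp [pvTruthy] at hl; simpa using hl
            rw [if_neg hl]
            simp [pvDFold, hs, hl', pvSaveA, ht]
        · rw [if_neg ht, hsegs]
          have hsave : pvSaveA d cs cc = d := by simp [pvSaveA, ht]
          rw [hsave]
          by_cases hl : pvTruthy (some (PySem.Str.strip l)) = true
          · have hl' : PySem.Str.strip l ≠ "" := by
              simp [pvTruthy] at hl; simpa using hl
            rw [if_pos hl]
            simp [pvDFold, hl']
          · have hl' : PySem.Str.strip l = "" := by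
              simp [pvTruthy] at hl; simpa using hl
            rw [if_neg hl]
            simp [pvDFold, hl']
      · -- non-header line
        have hsegs : pvSegs sections (l :: ls) = pvSegs sections ls := by
          simp [pvSegs, hh]
        have htw : (l :: ls).takeWhile (fun x => !pvIsHdr sections x) =
            l :: ls.takeWhile (fun x => !pvIsHdr sections x) := by
          simp [List.takeWhile, hh]
        by_cases ht : pvTruthy cs = true
        · simp only [List.foldl_cons]
          rw [show (pvStepA sections (d, cs, cc) l) = (d, cs, cc ++ [l]) by
            simp [pvStepA, hh, ht]]
          rw [ih d cs (cc ++ [l])]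
          rw [if_pos ht, if_pos ht, hsegs, htw]
          simp
        · simp only [List.foldl_cons]
          rw [show (pvStepA sections (d, cs, cc) l) = (d, cs, cc) by
            simp [pvStepA, hh, ht]]
          rw [ih d cs cc]
          rw [if_neg ht, if_neg ht, hsegs]

-- header table of B, with an arbitrary enumeration offset
def pvHd (sections : List String) (ls : List String) (s : Int) : List (Int × String) :=
  (PySem.List.enumerate ls s).filterMap
    (fun p => if pvIsHdr sections p.2 then some (p.1, PySem.Str.strip p.2) else none)

theorem pvHd_nil (sections : List String) (s : Int) : pvHd sections [] s = [] := by
  simp [pvHd, PySem.List.enumerate]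

theorem pvHd_cons (sections : List String) (l : String) (ls : List String) (s : Int) :
    pvHd sections (l :: ls) s =
      if pvIsHdr sections l then (s, PySem.Str.strip l) :: pvHd sections ls (s + 1)
      else pvHd sections ls (s + 1) := by
  simp only [pvHd, PySem.List.enumerate_cons, List.filterMap_cons]
  by_cases hh : pvIsHdr sections l = true
  · simp [hh]
  · simp [hh]

-- every header index is the offset plus a position with only non-headers before it
theorem pvHd_first (sections : List String) (ls : List String) :
    ∀ (m : Nat),
      (pvHd sections ls (m : Int) = [] →
        ls.takeWhile (fun x => !pvIsHdr sections x) = ls) ∧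
      (∀ i t rest, pvHd sections ls (m : Int) = (i, t) :: rest →
        ∃ k : Nat, i = ((m + k : Nat) : Int) ∧
          ls.take k = ls.takeWhile (fun x => !pvIsHdr sections x)) := by
  induction ls with
  | nil =>
      intro m
      constructor
      · intro _; simp
      · intro i t rest h; rw [pvHd_nil] at h; cases h
  | cons l ls ih =>
      intro m
      rw [pvHd_cons]
      by_cases hh : pvIsHdr sections l = true
      · rw [if_pos hh]
        constructor
        · intro h; cases h
        · intro i t rest h
          refine ⟨0, ?_, ?_⟩
          · have : i = (m : Int) := by
              have := congrArg (fun xs => List.head? xs) h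
              simp at this
              exact this.1.symm
            simpa using this
          · simp [List.takeWhile, hh]
      · rw [if_neg hh]
        have hm : ((m : Int) + 1) = ((m + 1 : Nat) : Int) := by push_cast; ring
        rw [hm]
        constructor
        · intro h
          have := (ih (m + 1)).1 h
          simp [List.takeWhile, hh, this]
        · intro i t rest h
          obtain ⟨k, hk1, hk2⟩ := (ih (m + 1)).2 i t rest h
          refine ⟨k + 1, ?_, ?_⟩
          · rw [hk1]; push_cast; ring
          · simp [List.take, List.takeWhile, hh, hk2]

-- first element of the boundary list: the next header's index, or the total length
def pvFB (h' : List (Int × String)) (N : Int) : Int :=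
  match h' with
  | [] => N
  | (i, _) :: _ => i

theorem pvZipShift (h' : List (Int × String)) (N : Int) (a : Int × String) :
    (a :: h').zip (h'.map (·.1) ++ [N]) =
      (a, pvFB h' N) :: h'.zip ((h'.drop 1).map (·.1) ++ [N]) := by
  cases h' with
  | nil => simp [pvFB]
  | cons b t => simp [pvFB]

-- the slice between a header and the next boundary is exactly the non-header run after it
theorem pvSliceContent (sections : List String) (pre : List String) (l : String)
    (ls : List String) :
    PySem.List.slice (pre ++ l :: ls) (some ((pre.length : Int) + 1))
        (some (pvFB (pvHd sections ls (((pre ++ [l]).length : Nat) : Int))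
          (((pre ++ l :: ls).length : Nat) : Int))) =
      ls.takeWhile (fun x => !pvIsHdr sections x) := by
  have hdrop : (pre ++ l :: ls).drop (pre.length + 1) = ls := by
    rw [show pre ++ l :: ls = (pre ++ [l]) ++ ls from by simp,
      show pre.length + 1 = (pre ++ [l]).length from by simp]
    exact List.drop_left
  have h1 : (pre.length : Int) + 1 = ((pre.length + 1 : Nat) : Int) := by push_cast; ring
  rcases hcase : pvHd sections ls (((pre ++ [l]).length : Nat) : Int) with _ | ⟨⟨i₀, t₀⟩, rest⟩
  · have hall := (pvHd_first sections ls ((pre ++ [l]).length)).1 hcase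
    have h2 : (((pre ++ l :: ls).length : Nat) : Int) = ((pre.length + 1 + ls.length : Nat) : Int) := by
      push_cast [List.length_append, List.length_cons]; ring
    rw [pvFB, h1, h2, PySem.List.slice_natCast, hdrop,
      show pre.length + 1 + ls.length - (pre.length + 1) = ls.length by omega,
      List.take_length, hall]
  · obtain ⟨k, hk1, hk2⟩ :=
      (pvHd_first sections ls ((pre ++ [l]).length)).2 i₀ t₀ rest hcase
    have h2 : i₀ = ((pre.length + 1 + k : Nat) : Int) := by
      rw [hk1]; push_cast [List.length_append, List.length_cons, List.length_nil]; ring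
    rw [pvFB, h1, h2, PySem.List.slice_natCast, hdrop,
      show pre.length + 1 + k - (pre.length + 1) = k by omega, hk2]

-- B's emitted pair for one (header, next-boundary) entry
def pvEmit (lines : List String) (p : (Int × String) × Int) : String × String :=
  (p.1.2, PySem.Str.strip (PySem.Str.join "\n"
    (PySem.List.slice lines (some (p.1.1 + 1)) (some p.2))))

theorem pvB_pairs (sections : List String) (ls : List String) :
    ∀ (pre : List String),
    ((pvHd sections ls (pre.length : Int)).zip
        (((pvHd sections ls (pre.length : Int)).drop 1).map (·.1) ++
          [((pre ++ ls).length : Int)])).map (pvEmit (pre ++ ls)) =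
      pvSegs sections ls := by
  induction ls with
  | nil => intro pre; simp [pvHd_nil, pvSegs]
  | cons l ls ih =>
      intro pre
      have hm : ((pre.length : Int) + 1) = (((pre ++ [l]).length : Nat) : Int) := by
        push_cast [List.length_append, List.length_cons, List.length_nil]; ring
      rw [pvHd_cons]
      by_cases hh : pvIsHdr sections l = true
      · rw [if_pos hh, hm]
        rw [List.drop_one, List.tail_cons]
        rw [pvZipShift]
        rw [List.map_cons]
        have hseg : pvSegs sections (l :: ls) =
            (PySem.Str.strip l,
              PySem.Str.strip (PySem.Str.join "\n"
                (ls.takeWhile (fun x => !pvIsHdr sections x)))) :: pvSegs sections ls := by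
          simp [pvSegs, hh]
        rw [hseg]
        have hhead : pvEmit (pre ++ l :: ls)
            (((pre.length : Int), PySem.Str.strip l),
              pvFB (pvHd sections ls (((pre ++ [l]).length : Nat) : Int))
                (((pre ++ l :: ls).length : Nat) : Int)) =
            (PySem.Str.strip l, PySem.Str.strip (PySem.Str.join "\n"
              (ls.takeWhile (fun x => !pvIsHdr sections x)))) := by
          simp only [pvEmit]
          rw [pvSliceContent sections pre l ls]
        rw [hhead]
        have hih := ih (pre ++ [l])
        rw [show (pre ++ [l]) ++ ls = pre ++ l :: ls from by simp] at hih
        rw [hih]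
      · rw [if_neg hh, hm]
        have hseg : pvSegs sections (l :: ls) = pvSegs sections ls := by
          simp [pvSegs, hh]
        rw [hseg, show pre ++ l :: ls = (pre ++ [l]) ++ ls from by simp]
        exact ih (pre ++ [l])

-- ===== VERDICT (by name: the statement is the Claim_ definition above) =====
theorem extract_text_sections_spec : Claim_equal_extract_text_sections := by
  intro text sections _
  unfold Spec_extract_text_sections extract_text_sections extract_text_sections_alt
  simp only []
  set lines := (PySem.Str.split? text "\n").getD [] with hlines
  have hA := pvA_fold sections lines PySem.Dict.empty none []
  simp only [pvTruthy, Bool.false_eq_true, if_false] at hA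
  have hB := pvB_pairs sections lines []
  simp only [List.nil_append, List.length_nil, Nat.cast_zero] at hB
  rw [hA]
  congr 1
  rw [← hB]
  unfold pvDFold pvHd
  rw [List.foldl_map]
  rfl
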